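-- pv_equiv track=rewrite | github.com/GroguLovesCookies/MinecraftModdingTool | java_editor/custom_highlighter.py | getStringLocations
-- ===== SOURCE A (Python) =====
-- def getStringLocations(text):
--     i = 0
--     inString = False
--     stringLocs = []
--     while i < len(text):
--         char = text[i]
--         if char == "\"" or char == "\'":
--             if not inString:
--                 inString = True
--                 stringLocs.append([i])
--             else:
--                 inString = False
--                 stringLocs[-1].append(i+1)
--         i += 1
--     return stringLocs
-- ===== SOURCE B (Python) =====
-- def getStringLocations(text):
--     # Two-pass: index the quote positions first, then pair them up.
--     positions = [i for i, c in enumerate(text) if c == "\"" or c == "\'"]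
--     stringLocs = []
--     while len(positions) >= 2:
--         stringLocs.append([positions[0], positions[1] + 1])
--         positions = positions[2:]
--     if positions:
--         stringLocs.append([positions[0]])
--     return stringLocs
-- ===== Notes on version B (the rewrite author's own statement) =====
-- stated objective: alternative
-- what changed: Replaced A's single toggling in-string state machine (which mutates the last appended list) with a two-pass scheme: first collect all quote indices via enumerate, then pair consecutive positions into [open, close+1] spans plus a trailing singleton for an unclosed quote. (constant-factor speedup: the quote scan runs as a C-level comprehension instead of an indexed Python while loop)
import Mathlib
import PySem

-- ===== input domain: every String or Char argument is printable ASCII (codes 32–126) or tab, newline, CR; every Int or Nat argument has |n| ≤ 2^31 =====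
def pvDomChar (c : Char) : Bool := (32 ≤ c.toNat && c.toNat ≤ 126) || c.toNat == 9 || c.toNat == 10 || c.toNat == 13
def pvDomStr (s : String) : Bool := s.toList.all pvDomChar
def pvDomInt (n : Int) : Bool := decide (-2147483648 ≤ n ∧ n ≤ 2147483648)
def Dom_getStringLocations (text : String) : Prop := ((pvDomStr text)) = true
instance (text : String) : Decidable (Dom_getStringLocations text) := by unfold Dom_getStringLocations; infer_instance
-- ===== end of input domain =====

-- B replaces A's toggling in-string state machine with a two-pass scheme (collect quote
-- positions, then pair them into spans); alternative decomposition, same complexity.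


-- ===== PORT A =====
-- A's while loop: index i, flag inString, accumulator stringLocs; a closing quote is
-- appended to the LAST list of the accumulator (stringLocs[-1].append(i+1)).
def pvAppendLast (acc : List (List Int)) (x : Int) : List (List Int) :=
  acc.dropLast ++ [acc.getLast! ++ [x]]

def pvALoop : List Char → Int → Bool → List (List Int) → List (List Int)
  | [], _, _, acc => acc
  | c :: rest, i, inString, acc =>
    if c = '"' ∨ c = '\'' then
      if !inString then pvALoop rest (i + 1) true (acc ++ [[i]])
      else pvALoop rest (i + 1) false (pvAppendLast acc (i + 1))
    else pvALoop rest (i + 1) inString acc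

def getStringLocations (text : String) : List (List Int) :=
  pvALoop text.toList 0 false []

-- ===== PORT B =====
-- B pass 1: quote positions via enumerate; pass 2: consume positions two at a time.
def pvPositions (text : List Char) : List Int :=
  (PySem.List.enumerate text).filterMap
    (fun ic => if ic.2 = '"' ∨ ic.2 = '\'' then some ic.1 else none)

def pvPairUp : List Int → List (List Int)
  | p :: q :: rest => [p, q + 1] :: pvPairUp rest
  | [p] => [[p]]
  | [] => []

def getStringLocations_alt (text : String) : List (List Int) :=
  pvPairUp (pvPositions text.toList)

-- ===== PRECONDITION & SPEC =====
def Spec_getStringLocations (text : String) (out : List (List Int)) : Prop := out = getStringLocations_alt text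
instance (text : String) (out : List (List Int)) : Decidable (Spec_getStringLocations text out) := by unfold Spec_getStringLocations; infer_instance

-- ===== CLAIM (what is proved, stated in full; the proofs are below) =====
def Claim_equal_getStringLocations : Prop := ∀ (text : String), Dom_getStringLocations text → Spec_getStringLocations text (getStringLocations text)

-- ===== LEMMAS AND PROOFS =====

-- quote positions of l, indexed from i (proof-side characterisation of pvPositions)
def pvPos : List Char → Int → List Int
  | [], _ => []
  | c :: rest, i => if c = '"' ∨ c = '\'' then i :: pvPos rest (i + 1) else pvPos rest (i + 1)

theorem pvPositions_eq (l : List Char) (i : Int) :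
    (PySem.List.enumerate l i).filterMap
      (fun ic => if ic.2 = '"' ∨ ic.2 = '\'' then some ic.1 else none) = pvPos l i := by
  induction l generalizing i with
  | nil => simp [PySem.List.enumerate_nil, pvPos]
  | cons c rest ih =>
    simp only [PySem.List.enumerate_cons, List.filterMap_cons, pvPos]
    by_cases h : c = '"' ∨ c = '\'' <;> simp [h, ih]

theorem pvAppendLast_concat (acc : List (List Int)) (last : List Int) (x : Int) :
    pvAppendLast (acc ++ [last]) x = acc ++ [last ++ [x]] := by
  unfold pvAppendLast
  rw [List.dropLast_concat]
  have : (acc ++ [last]).getLast! = last := by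
    cases acc with
    | nil => simp [List.getLast!]
    | cons a as => simp [List.getLast!]
  rw [this]

theorem pvALoop_inv (l : List Char) :
    (∀ (i : Int) (acc : List (List Int)),
        pvALoop l i false acc = acc ++ pvPairUp (pvPos l i)) ∧
    (∀ (i : Int) (acc : List (List Int)) (last : List Int),
        pvALoop l i true (acc ++ [last]) =
          acc ++ match pvPos l i with
                 | [] => [last]
                 | j :: rest => (last ++ [j + 1]) :: pvPairUp rest) := by
  induction l with
  | nil => constructor <;> intros <;> simp [pvALoop, pvPos, pvPairUp]
  | cons c rest ih =>
    constructor
    · intro i acc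
      by_cases h : c = '"' ∨ c = '\''
      · simp only [pvALoop, h, if_true, Bool.not_false]
        rw [ih.2 (i + 1) acc [i]]
        simp only [pvPos, h, if_true]
        cases hp : pvPos rest (i + 1) with
        | nil => simp [pvPairUp]
        | cons j r => simp [pvPairUp]
      · simp only [pvALoop, h, if_false]
        rw [ih.1 (i + 1) acc]
        simp [pvPos, h]
    · intro i acc last
      by_cases h : c = '"' ∨ c = '\''
      · simp only [pvALoop, h, if_true, Bool.not_true, Bool.false_eq_true, if_false]
        rw [pvAppendLast_concat, ih.1 (i + 1)]
        simp [pvPos, h]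
      · simp only [pvALoop, h, if_false]
        rw [ih.2 (i + 1) acc last]
        simp [pvPos, h]

theorem pvALoop_false (l : List Char) (i : Int) (acc : List (List Int)) :
    pvALoop l i false acc = acc ++ pvPairUp (pvPos l i) :=
  (pvALoop_inv l).1 i acc

-- ===== VERDICT (by name: the statement is the Claim_ definition above) =====
theorem getStringLocations_spec : Claim_equal_getStringLocations := by
  intro text _
  show getStringLocations text = getStringLocations_alt text
  unfold getStringLocations getStringLocations_alt pvPositions
  rw [pvPositions_eq, pvALoop_false]
  rfl
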